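-- pv_equiv track=rewrite | github.com/Gayeon6423/MLLAB_Algorithm | Dohyun/lv2_롤케이크자르기.py | solution
-- ===== SOURCE A (Python) =====
-- from collections import Counter
--
-- def solution(topping):
--     answer = 0
--     one = Counter(topping)
--     two = dict()
--     for top in topping:
--         if one[top]:
--             one[top] -= 1
--             if one[top]==0:
--                 del one[top]
--             if top not in two.keys():
--                 two[top] = 1
--             else:
--                 two[top] += 1
--         if len(one.keys()) == len(two.keys()):
--             answer += 1
--     return answer
-- ===== SOURCE B (Python) =====
-- def solution(topping):
--     n = len(topping)
--     right = [0] * n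
--     seen = set()
--     for j in range(n - 1, -1, -1):
--         right[j] = len(seen)
--         seen.add(topping[j])
--     answer = 0
--     left = set()
--     for j, t in enumerate(topping):
--         left.add(t)
--         if len(left) == right[j]:
--             answer += 1
--     return answer
-- ===== Notes on version B (the rewrite author's own statement) =====
-- stated objective: alternative
-- what changed: Replaces A's single loop that mutates a remaining-Counter and a seen-dict in lockstep with a two-pass decomposition: a right-to-left pass precomputes a suffix-distinct table, then a forward pass with a left set compares against it.
import Mathlib
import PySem

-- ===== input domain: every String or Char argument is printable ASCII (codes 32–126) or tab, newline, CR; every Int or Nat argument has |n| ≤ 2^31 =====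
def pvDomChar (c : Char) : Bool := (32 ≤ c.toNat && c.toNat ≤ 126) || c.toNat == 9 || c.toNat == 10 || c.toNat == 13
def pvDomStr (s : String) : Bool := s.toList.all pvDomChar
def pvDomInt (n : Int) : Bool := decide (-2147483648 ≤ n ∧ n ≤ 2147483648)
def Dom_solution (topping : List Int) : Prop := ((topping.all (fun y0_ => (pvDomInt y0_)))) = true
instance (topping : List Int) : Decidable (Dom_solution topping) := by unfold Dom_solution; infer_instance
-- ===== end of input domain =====

-- B replaces A's single loop mutating a remaining-Counter and a seen-dict with a two-pass
-- decomposition (suffix-distinct table, then a forward scan with a left set); objective: alternative.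

-- ===== PORT A =====
-- one step of A's loop body over the state (answer, one, two)
def solutionStep (st : Int × PySem.Dict Int Int × PySem.Dict Int Int) (top : Int) :
    Int × PySem.Dict Int Int × PySem.Dict Int Int :=
  let answer := st.1
  let one := st.2.1
  let two := st.2.2
  let p :=
    if one.getD top 0 ≠ 0 then
      let one1 := one.insert top (one.getD top 0 - 1)   -- one[top] -= 1
      let one2 := if one1.getD top 0 = 0 then one1.erase top else one1
      let two' := if ¬ two.contains top then two.insert top 1
                  else two.insert top (two.getD top 0 + 1)   -- two[top] += 1
      (one2, two')
    else (one, two)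
  let answer := if p.1.size = p.2.size then answer + 1 else answer
  (answer, p.1, p.2)

def solution (topping : List Int) : Int :=
  (topping.foldl solutionStep (0, PySem.Dict.counter topping, PySem.Dict.empty)).1

-- ===== PORT B =====
-- right-to-left pass: returns (suffix-distinct table, set of all seen toppings)
def buildRight (topping : List Int) : List Int × PySem.Set Int :=
  match topping with
  | [] => ([], PySem.Set.empty)
  | x :: rest =>
    let p := buildRight rest
    (PySem.Set.len p.2 :: p.1, PySem.Set.add p.2 x)

-- one step of B's forward scan over the state (answer, left set); pairs are (topping[j], right[j])
def altStep (st : Int × PySem.Set Int) (p : Int × Int) : Int × PySem.Set Int :=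
  let left := PySem.Set.add st.2 p.1
  (if PySem.Set.len left = p.2 then st.1 + 1 else st.1, left)

def solution_alt (topping : List Int) : Int :=
  ((topping.zip (buildRight topping).1).foldl altStep (0, PySem.Set.empty)).1

-- ===== PRECONDITION & SPEC =====
def Spec_solution (topping : List Int) (out : Int) : Prop := out = solution_alt topping
instance (topping : List Int) (out : Int) : Decidable (Spec_solution topping out) := by unfold Spec_solution; infer_instance

-- ===== CLAIM (what is proved, stated in full; the proofs are below) =====
def Claim_equal_solution : Prop := ∀ (topping : List Int), Dom_solution topping → Spec_solution topping (solution topping)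

-- ===== LEMMAS AND PROOFS =====

-- reference function: count cuts where left-distinct equals right-distinct, carrying the left set
def refCount (s : PySem.Set Int) : List Int → Int
  | [] => 0
  | x :: xs =>
    (if PySem.Set.len (PySem.Set.add s x) = PySem.Set.len (PySem.Set.ofList xs) then (1 : Int) else 0)
      + refCount (PySem.Set.add s x) xs

-- two nodup lists with the same members have the same length
theorem length_eq_of_nodup_mem_iff {l₁ l₂ : List Int} (h₁ : l₁.Nodup) (h₂ : l₂.Nodup)
    (h : ∀ a, a ∈ l₁ ↔ a ∈ l₂) : l₁.length = l₂.length :=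
  ((List.perm_ext_iff_of_nodup h₁ h₂).2 h).length_eq

-- Dict.erase lemmas (not in the PySem lemma set)
theorem find?_filter_ne (l : List (Int × Int)) (k v : Int) (h : v ≠ k) :
    (l.filter (fun p => !(p.1 == k))).find? (fun p => p.1 == v) = l.find? (fun p => p.1 == v) := by
  induction l with
  | nil => rfl
  | cons a t ih =>
    by_cases ha : a.1 = k
    · simp [List.filter_cons, List.find?_cons, ha, ih, h.symm]
    · by_cases hv : a.1 = v
      · simp [List.filter_cons, List.find?_cons, ha, hv, h]
      · simp [List.filter_cons, List.find?_cons, ha, hv, ih]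

theorem get?_erase (d : PySem.Dict Int Int) (k v : Int) :
    (d.erase k).get? v = if v = k then none else d.get? v := by
  unfold PySem.Dict.erase PySem.Dict.get?
  split_ifs with h
  · subst h
    simp only [Option.map_eq_none_iff]
    rw [List.find?_eq_none]
    intro p hp
    simp only [List.mem_filter, Bool.not_eq_eq_eq_not, Bool.not_true, beq_eq_false_iff_ne] at hp
    simpa using hp.2
  · rw [find?_filter_ne _ _ _ h]

theorem getD_erase (d : PySem.Dict Int Int) (k v : Int) :
    (d.erase k).getD v 0 = if v = k then 0 else d.getD v 0 := by
  unfold PySem.Dict.getD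
  rw [get?_erase]
  split_ifs <;> rfl

theorem keys_erase_nodup (d : PySem.Dict Int Int) (k : Int) (h : d.keys.Nodup) :
    (d.erase k).keys.Nodup := by
  unfold PySem.Dict.erase PySem.Dict.keys at *
  exact h.sublist (List.Sublist.map _ List.filter_sublist)

theorem mem_keys_erase (d : PySem.Dict Int Int) (k v : Int) :
    v ∈ (d.erase k).keys ↔ v ∈ d.keys ∧ v ≠ k := by
  unfold PySem.Dict.erase PySem.Dict.keys
  simp only [List.mem_map, List.mem_filter]
  constructor
  · rintro ⟨p, ⟨hp, hne⟩, rfl⟩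
    exact ⟨⟨p, hp, rfl⟩, by simpa using hne⟩
  · rintro ⟨⟨p, hp, rfl⟩, hne⟩
    exact ⟨p, ⟨hp, by simpa using hne⟩, rfl⟩

theorem size_eq_keys_length (d : PySem.Dict Int Int) : d.size = d.keys.length := by
  unfold PySem.Dict.size PySem.Dict.keys
  simp

-- A's loop computes refCount, given the Counter/dict invariants
theorem foldA_eq_refCount (rest : List Int) :
    ∀ (a : Int) (one two : PySem.Dict Int Int) (s : PySem.Set Int),
      (∀ v, one.getD v 0 = (rest.count v : Int)) →
      one.keys.Nodup → (∀ v, v ∈ one.keys ↔ v ∈ rest) →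
      two.keys.Nodup → (∀ v, v ∈ two.keys ↔ v ∈ s) → s.Nodup →
      (rest.foldl solutionStep (a, one, two)).1 = a + refCount s rest := by
  induction rest with
  | nil => intro a one two s _ _ _ _ _ _; simp [refCount]
  | cons x xs ih =>
    intro a one two s h1 hn1 hm1 hn2 hm2 hs
    have hcx : one.getD x 0 = ((xs.count x : Int) + 1) := by
      rw [h1 x]; simp [List.count_cons]
    have hcond : one.getD x 0 ≠ 0 := by rw [hcx]; positivity
    rw [List.foldl_cons]
    simp only [solutionStep]
    rw [if_pos hcond]
    set one1 := one.insert x (one.getD x 0 - 1) with hone1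
    set one2 := if one1.getD x 0 = 0 then one1.erase x else one1 with hone2
    set two' := if ¬ two.contains x then two.insert x 1
                else two.insert x (two.getD x 0 + 1) with htwo'
    set s' := PySem.Set.add s x with hs'
    have h1' : ∀ v, one1.getD v 0 = (xs.count v : Int) := by
      intro v
      rw [hone1, PySem.Dict.getD_insert]
      split_ifs with hv
      · subst hv; rw [hcx]; ring
      · rw [h1 v]; simp [List.count_cons, Ne.symm hv]
    have hxone : x ∈ one.keys := (hm1 x).2 (by simp)
    have hn1' : one1.keys.Nodup := PySem.Dict.nodup_keys_insert _ _ _ hn1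
    have hm1' : ∀ v, v ∈ one1.keys ↔ v ∈ (x :: xs) := by
      intro v
      rw [hone1, PySem.Dict.keys_insert_of_contains _ _ ((PySem.Dict.contains_iff_mem_keys _ _).2 hxone)]
      exact hm1 v
    have h1'' : ∀ v, one2.getD v 0 = (xs.count v : Int) := by
      intro v
      rw [hone2]
      split_ifs with hz
      · rw [getD_erase]
        split_ifs with hv
        · rw [hv]
          have := h1' x; rw [hz] at this
          omega
        · exact h1' v
      · exact h1' v
    have hn1'' : one2.keys.Nodup := by
      rw [hone2]; split_ifs with hz
      · exact keys_erase_nodup _ _ hn1'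
      · exact hn1'
    have hm1'' : ∀ v, v ∈ one2.keys ↔ v ∈ xs := by
      intro v
      rw [hone2]
      split_ifs with hz
      · have hx0 : x ∉ xs := by
          have := h1' x; rw [hz] at this
          intro hmem
          have hc := List.count_pos_iff.2 hmem
          omega
        rw [mem_keys_erase, hm1' v]
        constructor
        · rintro ⟨hv, hne⟩
          rcases List.mem_cons.1 hv with rfl | h
          · exact absurd rfl hne
          · exact h
        · intro hv
          exact ⟨List.mem_cons_of_mem _ hv, fun hvx => hx0 (hvx ▸ hv)⟩
      · have hx1 : x ∈ xs := by
          have hcnt : xs.count x ≠ 0 := by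
            intro hc
            exact hz (by rw [h1' x, hc]; rfl)
          exact List.count_pos_iff.1 (by omega)
        rw [hm1' v]
        constructor
        · intro hv
          rcases List.mem_cons.1 hv with rfl | h
          · exact hx1
          · exact h
        · exact List.mem_cons_of_mem _
    have hn2' : two'.keys.Nodup := by
      rw [htwo']; split_ifs <;> exact PySem.Dict.nodup_keys_insert _ _ _ hn2
    have hm2' : ∀ v, v ∈ two'.keys ↔ v ∈ s' := by
      intro v
      rw [htwo', hs']
      split_ifs with hc
      · have hct : two.contains x = true := by simpa using hc
        rw [PySem.Dict.keys_insert_of_contains _ _ hct, PySem.Set.mem_add, hm2 v]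
        have hxs : x ∈ s := (hm2 x).1 ((PySem.Dict.contains_iff_mem_keys _ _).1 hct)
        constructor
        · exact Or.inl
        · rintro (h | rfl)
          · exact h
          · exact hxs
      · have hcf : two.contains x = false := by simpa using hc
        rw [PySem.Dict.keys_insert_of_not_contains _ _ hcf]
        rw [List.mem_append, PySem.Set.mem_add, hm2 v]
        simp
    have hs'' : List.Nodup s' := PySem.Set.nodup_add _ _ hs
    have hsz1 : one2.size = (PySem.Set.ofList xs : List Int).length := by
      rw [size_eq_keys_length]
      exact length_eq_of_nodup_mem_iff hn1'' (PySem.Set.nodup_ofList _)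
        (fun v => (hm1'' v).trans (PySem.Set.mem_ofList _ _).symm)
    have hsz2 : two'.size = (s' : List Int).length := by
      rw [size_eq_keys_length]
      exact length_eq_of_nodup_mem_iff hn2' hs'' hm2'
    have hiff : (one2.size = two'.size) ↔
        (PySem.Set.len s' = PySem.Set.len (PySem.Set.ofList xs)) := by
      rw [hsz1, hsz2]
      unfold PySem.Set.len
      omega
    rw [ih _ one2 two' s' h1'' hn1'' hm1'' hn2' hm2' hs'']
    simp only [refCount, ← hs']
    split_ifs with hA hB hB
    · ring
    · exact absurd (hiff.1 hA) hB
    · exact absurd (hiff.2 hB) hA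
    · ring

-- the set built by B's reverse pass: nodup, members = members of the list
theorem buildRight_snd (l : List Int) :
    List.Nodup (buildRight l).2 ∧ (∀ v, v ∈ (buildRight l).2 ↔ v ∈ l) := by
  induction l with
  | nil => exact ⟨List.nodup_nil, by simp [buildRight, PySem.Set.empty]⟩
  | cons x xs ih =>
    refine ⟨PySem.Set.nodup_add _ _ ih.1, fun v => ?_⟩
    rw [show (buildRight (x :: xs)).2 = PySem.Set.add (buildRight xs).2 x from rfl,
      PySem.Set.mem_add, ih.2 v]
    constructor
    · rintro (h | rfl)
      · exact List.mem_cons_of_mem _ h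
      · exact List.mem_cons_self
    · intro h
      rcases List.mem_cons.1 h with rfl | h
      · exact Or.inr rfl
      · exact Or.inl h

theorem len_buildRight (l : List Int) :
    PySem.Set.len (buildRight l).2 = PySem.Set.len (PySem.Set.ofList l) := by
  unfold PySem.Set.len
  rw [length_eq_of_nodup_mem_iff (buildRight_snd l).1 (PySem.Set.nodup_ofList l)
    (fun v => ((buildRight_snd l).2 v).trans (PySem.Set.mem_ofList _ _).symm)]

-- B's forward scan over the table computes refCount
theorem foldB_eq_refCount (l : List Int) :
    ∀ (a : Int) (s : PySem.Set Int),
      ((l.zip (buildRight l).1).foldl altStep (a, s)).1 = a + refCount s l := by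
  induction l with
  | nil => intro a s; simp [buildRight, refCount]
  | cons x xs ih =>
    intro a s
    rw [show (buildRight (x :: xs)).1 = PySem.Set.len (buildRight xs).2 :: (buildRight xs).1 from rfl]
    rw [List.zip_cons_cons, List.foldl_cons]
    simp only [altStep, len_buildRight]
    rw [ih]
    simp only [refCount]
    split_ifs <;> ring

-- ===== VERDICT (by name: the statement is the Claim_ definition above) =====
theorem solution_spec : Claim_equal_solution := by
  intro topping _
  unfold Spec_solution solution solution_alt
  rw [foldB_eq_refCount]
  rw [foldA_eq_refCount topping 0 (PySem.Dict.counter topping) PySem.Dict.empty PySem.Set.empty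
    (fun v => PySem.Dict.getD_counter _ _)
    (by rw [PySem.Dict.keys_counter]; exact PySem.Set.nodup_ofList _)
    (fun v => by rw [PySem.Dict.keys_counter]; exact PySem.Set.mem_ofList _ _)
    (by simp [PySem.Dict.keys_empty])
    (fun v => by simp [PySem.Dict.keys_empty, PySem.Set.empty])
    List.nodup_nil]
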